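-- pv_equiv track=rewrite | github.com/JianweiQ/Cross-lingual-classification | preprocessing.py | relabel20newsgroup
-- ===== SOURCE A (Python) =====
-- def relabel20newsgroup(target):
--     y = []
--     for t in target:
--         if t == 0 or t == 1:
--             y.append(0)
--         elif t == 2 or t == 3 or t == 4:
--             y.append(1)
--         else:
--             y.append(2)
--     return y
-- ===== SOURCE B (Python) =====
-- def relabel20newsgroup(target):
--     # staged overwrite: default class 2 everywhere, then paint band [0,4] with 1,
--     # then paint sub-band [0,1] with 0; later passes refine earlier ones.
--     y = [2] * len(target)
--     for i, t in enumerate(target):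
--         if 0 <= t <= 4:
--             y[i] = 1
--     for i, t in enumerate(target):
--         if 0 <= t <= 1:
--             y[i] = 0
--     return y
-- ===== Notes on version B (the rewrite author's own statement) =====
-- stated objective: alternative
-- what changed: Replaces A's single pass with a three-way if/elif ladder per element by a staged-overwrite scheme: the output starts as all 2s and two successive index passes paint the band 0<=t<=4 with 1 and then the sub-band 0<=t<=1 with 0.
import Mathlib
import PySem

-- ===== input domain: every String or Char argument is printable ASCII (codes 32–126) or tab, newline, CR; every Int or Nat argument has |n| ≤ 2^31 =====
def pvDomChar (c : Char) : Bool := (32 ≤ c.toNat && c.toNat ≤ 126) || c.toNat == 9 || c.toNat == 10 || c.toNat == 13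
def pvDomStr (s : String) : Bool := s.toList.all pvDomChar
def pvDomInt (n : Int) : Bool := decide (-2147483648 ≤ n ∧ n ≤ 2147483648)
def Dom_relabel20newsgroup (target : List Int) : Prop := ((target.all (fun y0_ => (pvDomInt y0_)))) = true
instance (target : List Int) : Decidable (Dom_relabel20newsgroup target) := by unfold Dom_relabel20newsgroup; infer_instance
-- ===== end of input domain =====

-- B replaces A's per-element if/elif ladder by staged overwrite passes (all 2s, paint [0,4] with 1, paint [0,1] with 0); alternative structure, same cost.
-- ===== PORT A =====
def relabel20newsgroup (target : List Int) : List Int :=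
  target.foldl (fun y t =>
    if t = 0 ∨ t = 1 then y ++ [0]
    else if t = 2 ∨ t = 3 ∨ t = 4 then y ++ [1]
    else y ++ [2]) []

-- ===== PORT B =====
-- Python's `for i, t in enumerate(target): … y[i] = v` is the foldl over
-- PySem.List.enumerate with List.set; the enumerate index is a nonnegative Int,
-- so `.toNat` on it is exact.
def relabel20newsgroup_alt (target : List Int) : List Int :=
  let y0 := List.replicate target.length (2 : Int)
  let y1 := (PySem.List.enumerate target 0).foldl
    (fun y q => if 0 ≤ q.2 ∧ q.2 ≤ 4 then y.set q.1.toNat 1 else y) y0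
  (PySem.List.enumerate target 0).foldl
    (fun y q => if 0 ≤ q.2 ∧ q.2 ≤ 1 then y.set q.1.toNat 0 else y) y1

-- ===== PRECONDITION & SPEC =====
def Spec_relabel20newsgroup (target : List Int) (out : List Int) : Prop := out = relabel20newsgroup_alt target
instance (target : List Int) (out : List Int) : Decidable (Spec_relabel20newsgroup target out) := by unfold Spec_relabel20newsgroup; infer_instance

-- ===== CLAIM (what is proved, stated in full; the proofs are below) =====
def Claim_equal_relabel20newsgroup : Prop := ∀ (target : List Int), Dom_relabel20newsgroup target → Spec_relabel20newsgroup target (relabel20newsgroup target)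

-- ===== LEMMAS AND PROOFS =====

-- one overwrite pass over enumerate = zipWith of the paint condition with the old values
theorem pass_lemma (c : Int → Prop) [DecidablePred c] (v : Int) :
    ∀ (ts pre ys : List Int), ys.length = ts.length →
    (PySem.List.enumerate ts (pre.length : Int)).foldl
      (fun y q => if c q.2 then y.set q.1.toNat v else y) (pre ++ ys)
    = pre ++ List.zipWith (fun t y => if c t then v else y) ts ys := by
  intro ts
  induction ts with
  | nil =>
    intro pre ys h
    simp at h
    simp [h, PySem.List.enumerate]
  | cons t ts ih =>
    intro pre ys h
    cases ys with
    | nil => simp at h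
    | cons y ys =>
      simp only [List.length_cons] at h
      rw [PySem.List.enumerate_cons]
      simp only [List.foldl_cons, List.zipWith]
      have hset : (pre ++ y :: ys).set pre.length v = pre ++ v :: ys := by
        rw [List.set_append]
        simp
      have hstep : (if c t then (pre ++ y :: ys).set (pre.length : Int).toNat v
                    else pre ++ y :: ys)
          = (pre ++ [if c t then v else y]) ++ ys := by
        by_cases hc : c t <;> simp [hc, hset]
      rw [hstep]
      have hlen : ((pre.length : Int) + 1) = ((pre ++ [if c t then v else y]).length : Int) := by
        simp
      rw [hlen, ih (pre ++ [if c t then v else y]) ys (by omega)]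
      simp

theorem zipWith_replicate_right (f : Int → Int → Int) (b : Int) :
    ∀ (ts : List Int), List.zipWith f ts (List.replicate ts.length b) = ts.map (fun t => f t b) := by
  intro ts
  induction ts with
  | nil => rfl
  | cons t ts ih => simp [List.replicate_succ, ih]

theorem zipWith_map_right (f : Int → Int → Int) (g : Int → Int) :
    ∀ (ts : List Int), List.zipWith f ts (ts.map g) = ts.map (fun t => f t (g t)) := by
  intro ts
  induction ts with
  | nil => rfl
  | cons t ts ih => simp [ih]

-- A's accumulator loop produces the pointwise ladder map
theorem relabel_foldl (target : List Int) (acc : List Int) :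
    target.foldl (fun y t =>
      if t = 0 ∨ t = 1 then y ++ [0]
      else if t = 2 ∨ t = 3 ∨ t = 4 then y ++ [1]
      else y ++ [2]) acc
    = acc ++ target.map (fun t =>
        if t = 0 ∨ t = 1 then (0 : Int)
        else if t = 2 ∨ t = 3 ∨ t = 4 then 1 else 2) := by
  induction target generalizing acc with
  | nil => simp
  | cons t ts ih =>
    simp only [List.foldl, List.map]
    split_ifs <;> simp [ih, List.append_assoc]

theorem relabel_point (t : Int) :
    (if t = 0 ∨ t = 1 then (0 : Int)
     else if t = 2 ∨ t = 3 ∨ t = 4 then 1 else 2)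
    = (if 0 ≤ t ∧ t ≤ 1 then (0 : Int) else if 0 ≤ t ∧ t ≤ 4 then 1 else 2) := by
  split_ifs <;> omega

-- ===== VERDICT (by name: the statement is the Claim_ definition above) =====
theorem relabel20newsgroup_spec : Claim_equal_relabel20newsgroup := by
  intro target _
  unfold Spec_relabel20newsgroup relabel20newsgroup relabel20newsgroup_alt
  have h1 := pass_lemma (fun t => 0 ≤ t ∧ t ≤ 4) 1 target [] (List.replicate target.length 2) (by simp)
  have h2 := pass_lemma (fun t => 0 ≤ t ∧ t ≤ 1) 0 target []
    (target.map (fun t => if 0 ≤ t ∧ t ≤ 4 then (1 : Int) else 2)) (by simp)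
  simp only [List.nil_append, List.length_nil, Int.ofNat_zero] at h1 h2
  rw [zipWith_replicate_right] at h1
  rw [zipWith_map_right] at h2
  simp only [relabel_foldl, List.nil_append]
  rw [h1, h2]
  refine List.map_congr_left fun t _ => ?_
  rw [relabel_point]
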